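-- pv_equiv track=rewrite | github.com/ElectOMate/ElectOMate-Backend | src/em_backend/custom_answers/score_calculator.py | build_party_answers_matrix
-- ===== SOURCE A (Python) =====
-- from typing import Any
--
-- def build_party_answers_matrix(questions_data: dict[str, Any], party_abbreviations: list[str]) -> list[list[int]]:
--     matrix = []
--     for question in questions_data["questions"]:
--         positions = question["positions"]
--         row = []
--         for party in party_abbreviations:
--             if party in positions.get("pro", {}).get("parties", {}):
--                 row.append(1)
--             elif party in positions.get("contra", {}).get("parties", {}):
--                 row.append(-1)
--             else:
--                 row.append(0)
--         matrix.append(row)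
--     return matrix
-- ===== SOURCE B (Python) =====
-- def _stance(party, positions):
--     if party in positions.get("pro", {}).get("parties", {}):
--         return 1
--     if party in positions.get("contra", {}).get("parties", {}):
--         return -1
--     return 0
--
--
-- def build_party_answers_matrix(questions_data, party_abbreviations):
--     # Column-major construction: one full column per party over all questions,
--     # then transpose by index to get the question-major matrix.
--     positions_list = [q["positions"] for q in questions_data["questions"]]
--     columns = [[_stance(party, p) for p in positions_list]
--                for party in party_abbreviations]
--     return [[columns[j][i] for j in range(len(party_abbreviations))]
--             for i in range(len(positions_list))]
-- ===== Notes on version B (the rewrite author's own statement) =====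
-- stated objective: alternative
-- what changed: B builds the matrix column-major (one stance column per party across all questions) and then transposes by index into the question-major rows, instead of A's row-major single pass; the stance test is factored into a helper.
import Mathlib
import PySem

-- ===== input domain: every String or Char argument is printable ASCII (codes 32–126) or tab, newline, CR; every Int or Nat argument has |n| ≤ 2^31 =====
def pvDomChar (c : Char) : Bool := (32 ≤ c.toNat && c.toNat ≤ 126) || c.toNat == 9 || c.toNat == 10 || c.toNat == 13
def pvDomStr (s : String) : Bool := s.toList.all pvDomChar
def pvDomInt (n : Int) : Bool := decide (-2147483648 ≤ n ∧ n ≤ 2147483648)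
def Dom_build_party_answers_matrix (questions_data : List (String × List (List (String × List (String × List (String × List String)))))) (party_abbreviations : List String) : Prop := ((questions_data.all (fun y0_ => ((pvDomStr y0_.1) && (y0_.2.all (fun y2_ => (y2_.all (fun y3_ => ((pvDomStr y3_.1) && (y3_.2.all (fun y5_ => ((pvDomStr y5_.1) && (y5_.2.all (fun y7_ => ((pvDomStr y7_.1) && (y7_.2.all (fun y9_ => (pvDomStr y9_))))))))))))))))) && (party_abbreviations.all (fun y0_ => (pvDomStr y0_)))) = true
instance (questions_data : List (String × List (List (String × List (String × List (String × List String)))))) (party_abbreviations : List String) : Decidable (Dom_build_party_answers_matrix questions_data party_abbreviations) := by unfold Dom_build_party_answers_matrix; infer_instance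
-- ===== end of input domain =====

-- B builds the matrix column-major (one column per party) and transposes by index, instead of A's row-major pass; alternative decomposition, same results (return value only).


-- ===== PORT A =====
def build_party_answers_matrix (questions_data : List (String × List (List (String × List (String × List (String × List String)))))) (party_abbreviations : List String) : List (List Int) :=
  ((PySem.Dict.get? (PySem.Dict.mk questions_data) "questions").getD []).foldl (fun matrix question =>
    let positions := (PySem.Dict.get? (PySem.Dict.mk question) "positions").getD []
    let row := party_abbreviations.foldl (fun row party =>
      if party ∈ PySem.Dict.getD (PySem.Dict.mk (PySem.Dict.getD (PySem.Dict.mk positions) "pro" [])) "parties" [] then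
        row ++ [(1 : Int)]
      else if party ∈ PySem.Dict.getD (PySem.Dict.mk (PySem.Dict.getD (PySem.Dict.mk positions) "contra" [])) "parties" [] then
        row ++ [(-1 : Int)]
      else
        row ++ [(0 : Int)]) []
    matrix ++ [row]) []

-- ===== PORT B =====
-- helper _stance from Source B
def pvStance (party : String) (positions : List (String × List (String × List String))) : Int :=
  if party ∈ PySem.Dict.getD (PySem.Dict.mk (PySem.Dict.getD (PySem.Dict.mk positions) "pro" [])) "parties" [] then 1
  else if party ∈ PySem.Dict.getD (PySem.Dict.mk (PySem.Dict.getD (PySem.Dict.mk positions) "contra" [])) "parties" [] then -1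
  else 0

def build_party_answers_matrix_alt (questions_data : List (String × List (List (String × List (String × List (String × List String)))))) (party_abbreviations : List String) : List (List Int) :=
  let positions_list := ((PySem.Dict.get? (PySem.Dict.mk questions_data) "questions").getD []).map
    (fun q => (PySem.Dict.get? (PySem.Dict.mk q) "positions").getD [])
  let columns := party_abbreviations.map (fun party => positions_list.map (fun p => pvStance party p))
  -- columns[j][i] is always in range, so the total indexing form pyGetD is exact here
  (PySem.List.pyRange 0 (positions_list.length : Int) 1).map (fun i =>
    (PySem.List.pyRange 0 (party_abbreviations.length : Int) 1).map (fun j =>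
      PySem.List.pyGetD (PySem.List.pyGetD columns j []) i 0))

-- ===== PRECONDITION & SPEC =====
-- Pre_: A raises KeyError when questions_data lacks key "questions" or a question lacks key "positions"; excluded here.
def Pre_build_party_answers_matrix (questions_data : List (String × List (List (String × List (String × List (String × List String)))))) (party_abbreviations : List String) : Prop :=
  (PySem.Dict.get? (PySem.Dict.mk questions_data) "questions").isSome = true ∧
  ∀ q ∈ (PySem.Dict.get? (PySem.Dict.mk questions_data) "questions").getD [], (PySem.Dict.get? (PySem.Dict.mk q) "positions").isSome = true
instance (questions_data : List (String × List (List (String × List (String × List (String × List String)))))) (party_abbreviations : List String) : Decidable (Pre_build_party_answers_matrix questions_data party_abbreviations) := by unfold Pre_build_party_answers_matrix; infer_instance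
def pvWitness_build_party_answers_matrix : (List (String × List (List (String × List (String × List (String × List String)))))) × List String :=
  ([("questions", [[("positions", [("pro", [("parties", ["A"])])])]])], ["A", "B"])
def Spec_build_party_answers_matrix (questions_data : List (String × List (List (String × List (String × List (String × List String)))))) (party_abbreviations : List String) (out : List (List Int)) : Prop := out = build_party_answers_matrix_alt questions_data party_abbreviations
instance (questions_data : List (String × List (List (String × List (String × List (String × List String)))))) (party_abbreviations : List String) (out : List (List Int)) : Decidable (Spec_build_party_answers_matrix questions_data party_abbreviations out) := by unfold Spec_build_party_answers_matrix; infer_instance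

-- ===== CLAIM (what is proved, stated in full; the proofs are below) =====
def Claim_equal_build_party_answers_matrix : Prop := ∀ (questions_data : List (String × List (List (String × List (String × List (String × List String)))))) (party_abbreviations : List String), Dom_build_party_answers_matrix questions_data party_abbreviations → Pre_build_party_answers_matrix questions_data party_abbreviations → Spec_build_party_answers_matrix questions_data party_abbreviations (build_party_answers_matrix questions_data party_abbreviations)

-- ===== LEMMAS AND PROOFS =====

-- A's inner foldl over appended singletons is the map of the branch test, which is pvStance
theorem pvRowA_eq (positions : List (String × List (String × List String))) (pa : List String) :
    pa.foldl (fun row party =>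
      if party ∈ PySem.Dict.getD (PySem.Dict.mk (PySem.Dict.getD (PySem.Dict.mk positions) "pro" [])) "parties" [] then
        row ++ [(1 : Int)]
      else if party ∈ PySem.Dict.getD (PySem.Dict.mk (PySem.Dict.getD (PySem.Dict.mk positions) "contra" [])) "parties" [] then
        row ++ [(-1 : Int)]
      else
        row ++ [(0 : Int)]) [] =
    pa.map (fun party => pvStance party positions) := by
  have h : (fun (row : List Int) (party : String) =>
      if party ∈ PySem.Dict.getD (PySem.Dict.mk (PySem.Dict.getD (PySem.Dict.mk positions) "pro" [])) "parties" [] then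
        row ++ [(1 : Int)]
      else if party ∈ PySem.Dict.getD (PySem.Dict.mk (PySem.Dict.getD (PySem.Dict.mk positions) "contra" [])) "parties" [] then
        row ++ [(-1 : Int)]
      else
        row ++ [(0 : Int)]) =
      fun row party => row ++ [pvStance party positions] := by
    funext row party
    unfold pvStance
    split_ifs <;> rfl
  rw [h, PySem.List.foldl_append_singleton_eq_map]
  simp

-- double list-getD with in-range indices is double getElem
theorem pvGetD2 {α : Type} (cols : List (List α)) (j i : Nat) (d : α)
    (hj : j < cols.length) (hi : i < (cols[j]'hj).length) :
    (cols.getD j []).getD i d = (cols[j]'hj)[i]'hi := by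
  rw [List.getD_eq_getElem _ _ hj, List.getD_eq_getElem _ _ hi]

-- transposing the column-major matrix by index recovers the row-major matrix
theorem pvTranspose_eq (ps : List (List (String × List (String × List String)))) (pa : List String) :
    ((PySem.List.pyRange 0 (ps.length : Int) 1).map (fun i =>
      (PySem.List.pyRange 0 (pa.length : Int) 1).map (fun j =>
        PySem.List.pyGetD (PySem.List.pyGetD (pa.map (fun party => ps.map (fun p => pvStance party p))) j []) i 0))) =
    ps.map (fun p => pa.map (fun party => pvStance party p)) := by
  apply List.ext_getElem
  · simp [PySem.List.length_pyRange_one]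
  · intro i h1 h2
    simp only [List.getElem_map, PySem.List.getElem_pyRange_one]
    apply List.ext_getElem
    · simp [PySem.List.length_pyRange_one]
    · intro j h3 h4
      simp only [List.getElem_map, PySem.List.getElem_pyRange_one, zero_add]
      have hj : j < pa.length := by
        have := h3; simp [PySem.List.length_pyRange_one] at this; omega
      have hi : i < ps.length := by
        have := h1; simp [PySem.List.length_pyRange_one] at this; omega
      simp only [PySem.List.pyGetD_natCast]
      rw [pvGetD2 _ j i _ (by simpa using hj) (by simpa using hi)]
      simp

-- ===== VERDICT (by name: the statement is the Claim_ definition above) =====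
theorem build_party_answers_matrix_spec : Claim_equal_build_party_answers_matrix := by
  intro qd pa _ _
  unfold Spec_build_party_answers_matrix build_party_answers_matrix build_party_answers_matrix_alt
  rw [PySem.List.foldl_append_singleton_eq_map]
  simp only [pvRowA_eq]
  rw [pvTranspose_eq]
  simp [List.map_map, Function.comp]
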